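-- pv_equiv track=rewrite | github.com/LucaMawyin/COMPSCI_1MD3 | Homework/Recursion/beginning_rec.py | is_k_near_palindrome
-- ===== SOURCE A (Python) =====
-- def is_palindrome(s: str)-> bool:
--     """
--     Returns True iff s is a palindrome.
--     Do not use rev or a loop.
--     """
--
--     return (len(s) <= 1) or ((s[0] == s[-1]) and is_palindrome(s[1:-1]))
--
-- def is_k_near_palindrome(s: str, k: int)-> bool:
--     """
--     Returns True iff s can be turned into a palindrome by removing
--     up to k characters.
--     """
--
--     if len(s) <= k+1:
--         return True
--
--
--     # Ran out of chances
--     if not k: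
--         return is_palindrome(s)
--
--     if s[0] == s[-1]:
--
--         # We still have another chance
--         return is_k_near_palindrome (s[1:-1], k)
--
--     # Lose a chance
--     return is_k_near_palindrome(s[:-1],k-1) or is_k_near_palindrome(s[1:],k-1)
-- ===== SOURCE B (Python) =====
-- def is_k_near_palindrome(s: str, k: int) -> bool:
--     """
--     Returns True iff s can be turned into a palindrome by removing
--     up to k characters.
--
--     Bottom-up interval DP with two rolling rows: prev[i] holds the
--     minimal number of deletions needed to make s[i:i+L] a palindrome.
--     O(n^2) time, O(n) space, instead of A's exponential branching.
--     """
--     n = len(s)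
--     prev2 = [0] * (n + 1)   # windows of length 0
--     prev = [0] * n          # windows of length 1
--     for L in range(2, n + 1):
--         prev2, prev = prev, [p2 if a == b else 1 + min(p1, p0)
--                              for a, b, p2, p1, p0
--                              in zip(s, s[L-1:], prev2[1:], prev[1:], prev)]
--     return (prev[0] if prev else 0) <= k
-- ===== Notes on version B (the rewrite author's own statement) =====
-- stated objective: faster
-- what changed: A decides recursively with exponential branching on mismatched ends while threading the deletion budget k; B computes the minimal number of deletions via a bottom-up interval DP with two rolling rows and compares it to k once.
-- outside the precondition, e.g. on is_k_near_palindrome('aa', -1): A returns True, B returns False; on is_k_near_palindrome('', -1): A returns True, B returns False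
import Mathlib
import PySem

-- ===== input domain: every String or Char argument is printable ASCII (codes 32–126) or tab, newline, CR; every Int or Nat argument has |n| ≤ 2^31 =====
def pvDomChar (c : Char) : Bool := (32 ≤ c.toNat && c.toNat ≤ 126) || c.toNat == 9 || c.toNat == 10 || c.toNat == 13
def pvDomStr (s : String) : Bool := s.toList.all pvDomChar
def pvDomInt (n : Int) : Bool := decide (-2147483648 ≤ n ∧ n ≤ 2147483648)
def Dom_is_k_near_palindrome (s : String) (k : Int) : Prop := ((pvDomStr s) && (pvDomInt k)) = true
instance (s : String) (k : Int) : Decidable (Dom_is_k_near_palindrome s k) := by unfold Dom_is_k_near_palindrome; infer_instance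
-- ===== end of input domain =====

-- B replaces A's exponential budget-threading recursion by an O(n^2) bottom-up interval DP
-- (two rolling rows of minimal deletion counts) and compares the count to k once.


-- ===== PORT A =====
-- is_palindrome, fuel makes the recursion total; fuel = length + 1 always suffices on the call below
def aIsPal : Nat → String → Bool
  | 0, _ => true
  | fuel + 1, s =>
    decide (PySem.Str.len s ≤ 1) ||
      ((PySem.Str.pyGet? s 0 == PySem.Str.pyGet? s (-1)) &&
        aIsPal fuel (PySem.Str.slice s (some 1) (some (-1))))

def aKNP : Nat → String → Int → Bool
  | 0, _, _ => true
  | fuel + 1, s, k =>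
    if PySem.Str.len s ≤ k + 1 then true
    else if k == 0 then aIsPal (s.toList.length + 1) s
    else if PySem.Str.pyGet? s 0 == PySem.Str.pyGet? s (-1) then
      aKNP fuel (PySem.Str.slice s (some 1) (some (-1))) k
    else
      aKNP fuel (PySem.Str.slice s none (some (-1))) (k - 1) ||
        aKNP fuel (PySem.Str.slice s (some 1) none) (k - 1)

def is_k_near_palindrome (s : String) (k : Int) : Bool := aKNP (s.toList.length + 1) s k

-- ===== PORT B =====
-- one DP row: the zip(s, s[L-1:], prev2[1:], prev[1:], prev) comprehension of Source B
def bRow (cs : List Char) (L : Int) (prev2 prev : List Int) : List Int :=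
  ((cs.zip (PySem.List.slice cs (some (L - 1)) none)).zip
      (((PySem.List.slice prev2 (some 1) none).zip (PySem.List.slice prev (some 1) none)).zip prev)).map
    (fun x => if x.1.1 = x.1.2 then x.2.1.1 else 1 + min x.2.1.2 x.2.2)

def is_k_near_palindrome_alt (s : String) (k : Int) : Bool :=
  let cs := s.toList
  let n := cs.length
  let pp := (PySem.List.pyRange 2 ((n : Int) + 1) 1).foldl
      (fun (pp : List Int × List Int) L => (pp.2, bRow cs L pp.1 pp.2))
      (List.replicate (n + 1) (0 : Int), List.replicate n (0 : Int))
  decide ((match pp.2 with | [] => 0 | p :: _ => p) ≤ k)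

-- ===== PRECONDITION & SPEC =====
-- Pre_ excludes negative k: there A raises IndexError, except that on palindromes with
-- k = -1 the base case `len(s) <= k+1` accidentally fires on the empty remainder and A
-- returns True; B returns False for every negative k.
def Pre_is_k_near_palindrome (s : String) (k : Int) : Prop := 0 ≤ k
instance (s : String) (k : Int) : Decidable (Pre_is_k_near_palindrome s k) := by unfold Pre_is_k_near_palindrome; infer_instance

def pvWitness_is_k_near_palindrome : String × Int := ("aba", 1)

def Spec_is_k_near_palindrome (s : String) (k : Int) (out : Bool) : Prop := out = is_k_near_palindrome_alt s k
instance (s : String) (k : Int) (out : Bool) : Decidable (Spec_is_k_near_palindrome s k out) := by unfold Spec_is_k_near_palindrome; infer_instance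

-- ===== CLAIM (what is proved, stated in full; the proofs are below) =====
def Claim_equal_is_k_near_palindrome : Prop := ∀ (s : String) (k : Int), Dom_is_k_near_palindrome s k → Pre_is_k_near_palindrome s k → Spec_is_k_near_palindrome s k (is_k_near_palindrome s k)

-- ===== LEMMAS AND PROOFS =====

-- minimal number of deletions turning l into a palindrome (common reference value)
def delMin : List Char → Int
  | [] => 0
  | [_] => 0
  | a :: b :: t =>
    if a = (b :: t).getLast (by simp) then delMin ((b :: t).dropLast)
    else 1 + min (delMin ((a :: b :: t).dropLast)) (delMin (b :: t))
termination_by l => l.length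
decreasing_by all_goals (simp [List.length_dropLast]; try omega)

theorem delMin_short (l : List Char) (h : l.length ≤ 1) : delMin l = 0 := by
  rcases l with _ | ⟨a, _ | ⟨b, t⟩⟩ <;> simp_all [delMin]

theorem delMin_nonneg (l : List Char) : 0 ≤ delMin l := by
  induction l using delMin.induct with
  | case1 => simp [delMin]
  | case2 => simp [delMin]
  | case3 b t ih => simpa [delMin] using ih
  | case4 a b t hne ih1 ih2 =>
    simp [delMin, hne] at ih1 ih2 ⊢
    omega

theorem delMin_le (l : List Char) : l = [] ∨ delMin l ≤ (l.length : Int) - 1 := by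
  induction l using delMin.induct with
  | case1 => left; rfl
  | case2 => right; simp [delMin]
  | case3 b t ih =>
    right
    rcases ih with hnil | hle
    · simp [delMin, hnil, delMin_short]
      omega
    · simp [delMin] at hle ⊢
      omega
  | case4 a b t hne ih1 ih2 =>
    right
    rcases ih1 with hnil | hle1
    · simp at hnil
    rcases ih2 with hnil | hle2
    · simp at hnil
    simp [delMin, hne] at hle1 hle2 ⊢
    omega

theorem slice_one_neg_one {α : Type} (l : List α) :
    PySem.List.slice l (some 1) (some (-1)) = l.tail.dropLast := by
  rcases l with _ | ⟨a, t⟩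
  · rfl
  · simp [PySem.List.slice, PySem.List.clampIdx, List.dropLast_eq_take]
    split <;> omega

theorem aIsPal_eq (fuel : Nat) : ∀ (s : String), s.toList.length < fuel →
    aIsPal fuel s = decide (delMin s.toList = 0) := by
  induction fuel with
  | zero => intro s h; omega
  | succ f ih =>
    intro s h
    by_cases hlen : s.toList.length ≤ 1
    · have h0 : delMin s.toList = 0 := delMin_short _ hlen
      have hl1 : s.length ≤ 1 := by simpa using hlen
      simp [aIsPal, h0, hl1]
    · cases hl : s.toList with
      | nil => simp [hl] at hlen
      | cons a t =>
        cases t with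
        | nil => simp [hl] at hlen
        | cons b t =>
          have hg0 : PySem.Str.pyGet? s 0 = some a := by
            simp [PySem.Str.pyGet?, hl, PySem.List.pyGet?_zero_cons]
          have hg1 : PySem.Str.pyGet? s (-1) = some ((b :: t).getLast (by simp)) := by
            simp [PySem.Str.pyGet?, hl, PySem.List.pyGet?_neg_one]
            rw [List.getLast?_eq_some_getLast]
          have hmid : (PySem.Str.slice s (some 1) (some (-1))).toList = (b :: t).dropLast := by
            simp [PySem.Str.slice, slice_one_neg_one, hl]
          have hrec := ih (PySem.Str.slice s (some 1) (some (-1)))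
            (by rw [hmid]; rw [hl] at h; simp at h ⊢; omega)
          rw [hmid] at hrec
          simp only [aIsPal, hg0, hg1, hrec, hl, PySem.Str.len_eq]
          by_cases heq : a = (b :: t).getLast (by simp)
          · simp [delMin, heq]
          · have n1 := delMin_nonneg ((a :: b :: t).dropLast)
            have n2 := delMin_nonneg (b :: t)
            have hb : (a == (b :: t).getLast (by simp)) = false := by simp [heq]
            simp [delMin, heq, hb] at n1 n2 ⊢
            omega

theorem aKNP_eq (fuel : Nat) : ∀ (s : String) (k : Int), 0 ≤ k → s.toList.length < fuel →
    aKNP fuel s k = decide (delMin s.toList ≤ k) := by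
  induction fuel with
  | zero => intro s k _ h; omega
  | succ f ih =>
    intro s k hk h
    by_cases h1 : PySem.Str.len s ≤ k + 1
    · have hle : delMin s.toList ≤ k := by
        rcases delMin_le s.toList with hnil | hb
        · rw [hnil]; simpa [delMin] using hk
        · rw [PySem.Str.len_eq] at h1; omega
      simp only [aKNP, if_pos h1]
      exact (decide_eq_true hle).symm
    · by_cases hk0 : k = 0
      · subst hk0
        have hpal := aIsPal_eq (s.toList.length + 1) s (by omega)
        have hnn := delMin_nonneg s.toList
        simp only [aKNP, if_neg h1]
        rw [if_pos (show ((0 : Int) == 0) = true from rfl), hpal]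
        exact decide_eq_decide.mpr (by omega)
      · have hkb : (k == 0) = false := by simp [hk0]
        have hlen2 : 2 ≤ s.toList.length := by
          rw [PySem.Str.len_eq] at h1; omega
        cases hl : s.toList with
        | nil => simp [hl] at hlen2
        | cons a t =>
          cases t with
          | nil => simp [hl] at hlen2
          | cons b t =>
            have hg0 : PySem.Str.pyGet? s 0 = some a := by
              simp [PySem.Str.pyGet?, hl, PySem.List.pyGet?_zero_cons]
            have hg1 : PySem.Str.pyGet? s (-1) = some ((b :: t).getLast (by simp)) := by
              simp [PySem.Str.pyGet?, hl, PySem.List.pyGet?_neg_one]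
              rw [List.getLast?_eq_some_getLast]
            by_cases heq : a = (b :: t).getLast (by simp)
            · have hcond : (PySem.Str.pyGet? s 0 == PySem.Str.pyGet? s (-1)) = true := by
                rw [hg0, hg1]; simp [heq]
              have hmid : (PySem.Str.slice s (some 1) (some (-1))).toList = (b :: t).dropLast := by
                simp [PySem.Str.slice, slice_one_neg_one, hl]
              have hrec := ih (PySem.Str.slice s (some 1) (some (-1))) k hk
                (by rw [hmid]; rw [hl] at h; simp at h ⊢; omega)
              rw [hmid] at hrec
              simp only [aKNP, if_neg h1, hkb, Bool.false_eq_true, if_false, hcond, if_true, hrec, hl]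
              have hdel : delMin (a :: b :: t) = delMin ((b :: t).dropLast) := by
                simp [delMin, heq]
              rw [hdel]
            · have hcond : (PySem.Str.pyGet? s 0 == PySem.Str.pyGet? s (-1)) = false := by
                rw [hg0, hg1]; simp [heq]
              have hmidL : (PySem.Str.slice s none (some (-1))).toList = (a :: b :: t).dropLast := by
                rw [← hl]; exact PySem.Str.slice_to_neg_one s
              have hmidR : (PySem.Str.slice s (some 1) none).toList = b :: t := by
                simp [PySem.Str.slice, PySem.List.slice_from_one, hl]
              have hrecL := ih (PySem.Str.slice s none (some (-1))) (k - 1) (by omega)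
                (by rw [hmidL]; rw [hl] at h; simp at h ⊢; omega)
              have hrecR := ih (PySem.Str.slice s (some 1) none) (k - 1) (by omega)
                (by rw [hmidR]; rw [hl] at h; simp at h ⊢; omega)
              rw [hmidL] at hrecL
              rw [hmidR] at hrecR
              simp only [aKNP, if_neg h1, hkb, Bool.false_eq_true, if_false, hcond, hrecL, hrecR, hl]
              have hdel : delMin (a :: b :: t)
                  = 1 + min (delMin ((a :: b :: t).dropLast)) (delMin (b :: t)) := by
                simp [delMin, heq]
              rw [hdel, ← Bool.decide_or]
              exact decide_eq_decide.mpr (by omega)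

-- B-side: the intended contents of a DP row
def winDel (cs : List Char) (L : Nat) : List Int :=
  (List.range (cs.length + 1 - L)).map (fun i => delMin ((cs.drop i).take L))

theorem length_winDel (cs : List Char) (L : Nat) :
    (winDel cs L).length = cs.length + 1 - L := by
  simp [winDel]

theorem getElem_winDel (cs : List Char) (L i : Nat) (h : i < cs.length + 1 - L) :
    (winDel cs L)[i]'(by simp [length_winDel]; omega) = delMin ((cs.drop i).take L) := by
  simp [winDel]

theorem winDel_zero (cs : List Char) : winDel cs 0 = List.replicate (cs.length + 1) 0 := by
  simp [winDel, delMin, List.map_const']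

theorem winDel_one (cs : List Char) : winDel cs 1 = List.replicate cs.length 0 := by
  unfold winDel
  rw [show cs.length + 1 - 1 = cs.length from by omega]
  rw [List.map_congr_left (g := fun _ => (0 : Int))
    (fun i _ => delMin_short _ (by simp))]
  simp [List.map_const']

theorem delMin_two_le (w : List Char) (h : 2 ≤ w.length) :
    delMin w = if w[0]'(by omega) = w[w.length - 1]'(by omega) then delMin w.tail.dropLast
      else 1 + min (delMin w.dropLast) (delMin w.tail) := by
  rcases w with _ | ⟨a, _ | ⟨b, t⟩⟩
  · simp at h
  · simp at h
  · have hgl : (b :: t).getLast (by simp) = (b :: t)[t.length]'(by simp) := by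
      rw [List.getLast_eq_getElem]
      simp
      exact rfl
    by_cases heq : a = (b :: t).getLast (by simp)
    · simp [delMin, heq, hgl]
      intro hc
      exact absurd rfl hc
    · have hne' := heq
      rw [hgl] at hne'
      simp [delMin, hgl, hne']
      intro hc
      exact absurd hc hne'

theorem take_drop_window (cs : List Char) (i L : Nat) :
    ((cs.drop i).take L).tail = (cs.drop (i + 1)).take (L - 1) := by
  rw [← List.drop_one, List.drop_take, List.drop_drop]

theorem take_dropLast_window (cs : List Char) (i L : Nat) (hle : i + L ≤ cs.length) :
    ((cs.drop i).take L).dropLast = (cs.drop i).take (L - 1) := by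
  rw [List.dropLast_eq_take, List.take_take]
  congr 1
  simp [List.length_take, List.length_drop]
  omega

theorem delMin_window (cs : List Char) (i L : Nat) (h2 : 2 ≤ L) (hle : i + L ≤ cs.length) :
    delMin ((cs.drop i).take L) =
      if cs[i]'(by omega) = cs[L - 1 + i]'(by omega) then delMin ((cs.drop (i + 1)).take (L - 2))
      else 1 + min (delMin ((cs.drop (i + 1)).take (L - 1))) (delMin ((cs.drop i).take (L - 1))) := by
  have hw : ((cs.drop i).take L).length = L := by
    simp [List.length_take, List.length_drop]; omega
  rw [delMin_two_le _ (by omega)]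
  have h0 : ((cs.drop i).take L)[0]'(by omega) = cs[i]'(by omega) := by
    rw [List.getElem_take, List.getElem_drop]
    congr 1 <;> omega
  have hlast : ((cs.drop i).take L)[((cs.drop i).take L).length - 1]'(by omega)
      = cs[L - 1 + i]'(by omega) := by
    simp only [hw]
    rw [List.getElem_take, List.getElem_drop]
    congr 1
    omega
  rw [Int.min_comm]
  simp only [h0, hlast, take_drop_window, take_dropLast_window cs i L hle,
    take_dropLast_window cs (i + 1) (L - 1) (by omega)]
  rw [show L - 1 - 1 = L - 2 from by omega]

theorem bRow_eq (cs : List Char) (L : Nat) (h2 : 2 ≤ L) (p2 p1 : List Int) :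
    bRow cs (L : Int) p2 p1 =
      ((cs.zip (cs.drop (L - 1))).zip ((p2.tail.zip p1.tail).zip p1)).map
        (fun x => if x.1.1 = x.1.2 then x.2.1.1 else 1 + min x.2.1.2 x.2.2) := by
  unfold bRow
  rw [show (L : Int) - 1 = ((L - 1 : Nat) : Int) from by push_cast; omega]
  rw [PySem.List.slice_from_natCast, PySem.List.slice_from_one, PySem.List.slice_from_one]

theorem bRow_step (cs : List Char) (L : Nat) (h2 : 2 ≤ L) (hn : L ≤ cs.length) :
    bRow cs (L : Int) (winDel cs (L - 2)) (winDel cs (L - 1)) = winDel cs L := by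
  rw [bRow_eq cs L h2]
  apply List.ext_getElem
  · simp [length_winDel, List.length_zip, List.length_tail]
    omega
  · intro i hi1 hi2
    have hn' : i < cs.length + 1 - L := by simpa [length_winDel] using hi2
    simp only [List.getElem_map, List.getElem_zip, List.getElem_tail, List.getElem_drop]
    rw [getElem_winDel cs L i hn']
    rw [getElem_winDel cs (L - 2) (i + 1) (by omega), getElem_winDel cs (L - 1) (i + 1) (by omega),
      getElem_winDel cs (L - 1) i (by omega)]
    rw [delMin_window cs i L h2 (by omega)]

theorem fold_inv (cs : List Char) : ∀ (m : Nat), 1 ≤ m → m ≤ cs.length →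
    (PySem.List.pyRange 2 ((m : Int) + 1) 1).foldl
      (fun (pp : List Int × List Int) L => (pp.2, bRow cs L pp.1 pp.2))
      (winDel cs 0, winDel cs 1) = (winDel cs (m - 1), winDel cs m) := by
  intro m
  induction m with
  | zero => intro h; omega
  | succ m ihm =>
    intro _ hle
    by_cases hm : m = 0
    · subst hm
      rw [PySem.List.pyRange_one_eq_nil (by omega)]
      rfl
    · rw [show ((m + 1 : Nat) : Int) + 1 = ((m : Nat) : Int) + 1 + 1 from by push_cast; ring]
      rw [PySem.List.pyRange_one_succ_right (by omega), List.foldl_append]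
      rw [ihm (by omega) (by omega)]
      simp only [List.foldl_cons, List.foldl_nil]
      rw [show ((m : Nat) : Int) + 1 = (((m + 1 : Nat)) : Int) from by push_cast; ring]
      rw [show winDel cs (m - 1) = winDel cs ((m + 1) - 2) from by congr 1 <;> omega,
        show winDel cs m = winDel cs ((m + 1) - 1) from by congr 1 <;> omega]
      rw [bRow_step cs (m + 1) (by omega) (by omega)]

theorem alt_eq (s : String) (k : Int) :
    is_k_near_palindrome_alt s k = decide (delMin s.toList ≤ k) := by
  unfold is_k_near_palindrome_alt
  dsimp only
  by_cases hn : s.toList.length = 0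
  · rw [hn]
    rw [show ((0 : Nat) : Int) + 1 = (1 : Int) from by norm_num]
    rw [PySem.List.pyRange_one_eq_nil (by omega)]
    have : s.toList = [] := List.eq_nil_of_length_eq_zero hn
    simp [this, delMin]
  · rw [← winDel_zero, ← winDel_one]
    rw [fold_inv s.toList s.toList.length (by omega) (by omega)]
    have : winDel s.toList s.toList.length = [delMin s.toList] := by
      unfold winDel
      rw [show s.toList.length + 1 - s.toList.length = 1 from by omega]
      simp
      rw [← String.length_toList]
      exact congrArg delMin List.take_length
    rw [this]

-- ===== VERDICT (by name: the statement is the Claim_ definition above) =====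
theorem is_k_near_palindrome_spec : Claim_equal_is_k_near_palindrome := by
  intro s k _ hpre
  unfold Spec_is_k_near_palindrome
  have hk : (0 : Int) ≤ k := hpre
  rw [alt_eq]
  unfold is_k_near_palindrome
  exact aKNP_eq (s.toList.length + 1) s k hk (by omega)
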